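-- pv_equiv track=rewrite | github.com/emiliano0807/Lenguajes_Y_Automatas_II | 3sat.py | adaptacion_3sat
-- ===== SOURCE A (Python) =====
-- def adaptacion_3sat(gen, solucion):
--     # Se asume que cada cl치usula tiene 3 variables
--     cont = 0
--     for i in range(0, len(gen), 3):
--         clausula_ok = False
--         for j in range(3):
--             if i + j < len(gen) and gen[i + j] == solucion[i + j]:
--                 clausula_ok = True
--         if clausula_ok:
--             cont += 1
--     return cont
-- ===== SOURCE B (Python) =====
-- def adaptacion_3sat(gen, solucion):
--     grupos = set()
--     for i in range(len(gen)):
--         if gen[i] == solucion[i]: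
--             grupos.add(i // 3)
--     return len(grupos)
-- ===== Notes on version B (the rewrite author's own statement) =====
-- stated objective: simpler
-- what changed: Replaces the nested chunk loop with a boolean flag by one flat pass over the indices that collects each matching index's group i//3 into a set and returns its size.
import Mathlib
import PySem

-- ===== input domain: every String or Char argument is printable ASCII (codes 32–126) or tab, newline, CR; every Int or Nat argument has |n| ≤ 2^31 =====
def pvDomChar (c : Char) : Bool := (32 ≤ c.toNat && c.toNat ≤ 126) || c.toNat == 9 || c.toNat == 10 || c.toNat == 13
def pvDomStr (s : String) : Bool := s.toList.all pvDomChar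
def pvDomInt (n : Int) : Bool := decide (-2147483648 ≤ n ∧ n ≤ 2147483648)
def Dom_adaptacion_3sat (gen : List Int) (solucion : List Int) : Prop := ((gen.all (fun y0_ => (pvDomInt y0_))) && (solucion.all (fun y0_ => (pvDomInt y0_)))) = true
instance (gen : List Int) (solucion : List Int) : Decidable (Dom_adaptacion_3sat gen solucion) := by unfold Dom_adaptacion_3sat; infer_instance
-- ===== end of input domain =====

-- B replaces A's nested chunk loop + flag by one flat pass that collects each matching
-- index's group i//3 into a set and returns its size (objective: simpler).

-- ===== PORT A =====
def adaptacion_3sat (gen : List Int) (solucion : List Int) : Int :=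
  (PySem.List.pyRange 0 (gen.length : Int) 3).foldl (fun cont i =>
    let clausula_ok := (PySem.List.pyRange 0 3 1).foldl (fun ok j =>
      if i + j < (gen.length : Int) ∧
          PySem.List.pyGetD gen (i + j) 0 = PySem.List.pyGetD solucion (i + j) 0 then true
      else ok) false
    if clausula_ok then cont + 1 else cont) 0

-- ===== PORT B =====
def adaptacion_3sat_alt (gen : List Int) (solucion : List Int) : Int :=
  (((PySem.List.pyRange 0 (gen.length : Int) 1).foldl (fun (grupos : PySem.Set Int) i =>
      if PySem.List.pyGetD gen i 0 = PySem.List.pyGetD solucion i 0 then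
        PySem.Set.add grupos (PySem.Int.floordiv i 3)
      else grupos) PySem.Set.empty).length : Int)

-- ===== PRECONDITION & SPEC =====
-- Pre_ excludes exactly the inputs where the Python A raises IndexError: when solucion is
-- shorter than gen, A (and B alike) reads solucion past its end.
def Pre_adaptacion_3sat (gen : List Int) (solucion : List Int) : Prop :=
  gen.length ≤ solucion.length
instance (gen : List Int) (solucion : List Int) : Decidable (Pre_adaptacion_3sat gen solucion) := by
  unfold Pre_adaptacion_3sat; infer_instance

def pvWitness_adaptacion_3sat : List Int × List Int := ([1, 2, 3, 4], [1, 0, 0, 4])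

def Spec_adaptacion_3sat (gen : List Int) (solucion : List Int) (out : Int) : Prop := out = adaptacion_3sat_alt gen solucion
instance (gen : List Int) (solucion : List Int) (out : Int) : Decidable (Spec_adaptacion_3sat gen solucion out) := by unfold Spec_adaptacion_3sat; infer_instance

-- ===== CLAIM (what is proved, stated in full; the proofs are below) =====
def Claim_equal_adaptacion_3sat : Prop := ∀ (gen : List Int) (solucion : List Int), Dom_adaptacion_3sat gen solucion → Pre_adaptacion_3sat gen solucion → Spec_adaptacion_3sat gen solucion (adaptacion_3sat gen solucion)

-- ===== LEMMAS AND PROOFS =====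

-- the per-index match test, over natural indices
def pvQ (gen solucion : List Int) (k : Nat) : Bool :=
  decide (PySem.List.pyGetD gen (k : Int) 0 = PySem.List.pyGetD solucion (k : Int) 0)

-- number of 3-chunks starting at index a that contain at least one match, m indices remaining
def pvSpec (q : Nat → Bool) (a m : Nat) : Nat :=
  if m = 0 then 0
  else (if q a || (decide (1 < m) && q (a + 1)) || (decide (2 < m) && q (a + 2)) then 1 else 0)
       + pvSpec q (a + 3) (m - 3)
termination_by m
decreasing_by omega

theorem pvSpec_zero (q : Nat → Bool) (a : Nat) : pvSpec q a 0 = 0 := by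
  unfold pvSpec; simp

-- step-3 range induction lemmas
theorem pvRange3_nil (a n : Int) (h : n ≤ a) : PySem.List.pyRange a n 3 = [] := by
  rw [PySem.List.pyRange_of_pos a n (by norm_num)]
  rw [if_neg (by omega)]
  simp

theorem pvRange3_cons (a n : Int) (h : a < n) :
    PySem.List.pyRange a n 3 = a :: PySem.List.pyRange (a + 3) n 3 := by
  rw [PySem.List.pyRange_of_pos a n (by norm_num),
      PySem.List.pyRange_of_pos (a + 3) n (by norm_num)]
  rw [if_pos h]
  by_cases h3 : a + 3 < n
  · rw [if_pos h3]
    have hc : ((n - a + 3 - 1) / 3).toNat = ((n - (a + 3) + 3 - 1) / 3).toNat + 1 := by omega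
    rw [hc, List.range_succ_eq_map]
    simp only [List.map_cons, List.map_map]
    refine List.cons_eq_cons.mpr ⟨by norm_num, ?_⟩
    · apply List.map_congr_left
      intro k _
      simp [Function.comp]
      push_cast; ring
  · rw [if_neg h3]
    have hc : ((n - a + 3 - 1) / 3).toNat = 1 := by omega
    rw [hc]
    simp

def pvCadd (s : PySem.Set Int) (g : Int) (p : Prop) [Decidable p] : PySem.Set Int :=
  if p then PySem.Set.add s g else s

-- three conditional adds of the SAME fresh element
theorem pvStep3 (s : PySem.Set Int) (g : Int) (hg : g ∉ s)
    (p0 p1 p2 : Prop) [Decidable p0] [Decidable p1] [Decidable p2] :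
    ((pvCadd (pvCadd (pvCadd s g p0) g p1) g p2).length
      = s.length + (if p0 ∨ p1 ∨ p2 then 1 else 0)) ∧
    (∀ x, x ∈ pvCadd (pvCadd (pvCadd s g p0) g p1) g p2 → x ∈ s ∨ x = g) := by
  unfold pvCadd
  split_ifs with h0 h1 h2 h2 h1 h2 h2 <;>
    simp [PySem.Set.add_of_not_mem hg, PySem.Set.add_eq_ite, PySem.Set.mem_add] <;>
    first
      | (intro x hx; tauto)
      | tauto

theorem pvCast1 (a : Nat) : ((a : Int) + 1) = ((a + 1 : Nat) : Int) := by push_cast; ring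
theorem pvCast2 (a : Nat) : ((a : Int) + 2) = ((a + 2 : Nat) : Int) := by push_cast; ring

theorem pvFloordiv3 (a k : Nat) (h3 : 3 ∣ a) (hk : k < 3) :
    PySem.Int.floordiv ((a + k : Nat) : Int) 3 = ((a / 3 : Nat) : Int) := by
  have := PySem.Int.floordiv_natCast (a + k) 3
  have hdiv : (a + k) / 3 = a / 3 := by omega
  rw [show ((3:Int)) = ((3:Nat):Int) from by norm_num, this, hdiv]

theorem pvRange1_triple (a : Int) :
    PySem.List.pyRange a (a + 3) 1 = [a, a + 1, a + 2] := by
  rw [PySem.List.pyRange_one_cons (by omega), PySem.List.pyRange_one_cons (by omega),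
      PySem.List.pyRange_one_cons (by omega), PySem.List.pyRange_one_eq_nil (by omega)]
  norm_num
  omega

theorem pvB_loop (gen sol : List Int) (m : Nat) : ∀ (a : Nat) (s : PySem.Set Int),
    gen.length ≤ a + m → 3 ∣ a → (∀ x ∈ s, x < ((a / 3 : Nat) : Int)) →
    ((PySem.List.pyRange (a : Int) (gen.length : Int) 1).foldl
        (fun (grupos : PySem.Set Int) i =>
          if PySem.List.pyGetD gen i 0 = PySem.List.pyGetD sol i 0 then
            PySem.Set.add grupos (PySem.Int.floordiv i 3) else grupos) s).length
      = s.length + pvSpec (pvQ gen sol) a (gen.length - a) := by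
  induction m with
  | zero =>
    intro a s hle _ _
    rw [PySem.List.pyRange_one_eq_nil (by exact_mod_cast by omega)]
    rw [pvSpec]
    simp [show gen.length - a = 0 from by omega]
  | succ m ih =>
    intro a s hle h3 hfresh
    by_cases hna : gen.length ≤ a
    · rw [PySem.List.pyRange_one_eq_nil (by exact_mod_cast by omega)]
      rw [pvSpec]
      simp [show gen.length - a = 0 from by omega]
    · -- a < gen.length
      have hlt : a < gen.length := by omega
      set n := gen.length with hn
      have hg : ((a / 3 : Nat) : Int) ∉ s := fun hx => absurd (hfresh _ hx) (lt_irrefl _)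
      have hrw0 : PySem.Int.floordiv ((a : Nat) : Int) 3 = ((a / 3 : Nat) : Int) := by
        simpa using pvFloordiv3 a 0 h3 (by omega)
      have hrw1 : PySem.Int.floordiv ((a : Int) + 1) 3 = ((a / 3 : Nat) : Int) := by
        rw [pvCast1]; exact pvFloordiv3 a 1 h3 (by omega)
      have hrw2 : PySem.Int.floordiv ((a : Int) + 2) 3 = ((a / 3 : Nat) : Int) := by
        rw [pvCast2]; exact pvFloordiv3 a 2 h3 (by omega)
      by_cases hc3 : a + 3 ≤ n
      · have hsplit := PySem.List.pyRange_one_append (a : Int) ((a : Int) + 3) (n : Int)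
          (by omega) (by push_cast; omega)
        rw [hsplit, pvRange1_triple, List.foldl_append]
        simp only [List.foldl_cons, List.foldl_nil]
        simp only [hrw0, hrw1, hrw2]
        obtain ⟨hlen, hmem⟩ := pvStep3 s ((a / 3 : Nat) : Int) hg
          (PySem.List.pyGetD gen ((a : Nat) : Int) 0 = PySem.List.pyGetD sol ((a : Nat) : Int) 0)
          (PySem.List.pyGetD gen ((a : Int) + 1) 0 = PySem.List.pyGetD sol ((a : Int) + 1) 0)
          (PySem.List.pyGetD gen ((a : Int) + 2) 0 = PySem.List.pyGetD sol ((a : Int) + 2) 0)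
        unfold pvCadd at hlen hmem
        rw [show ((a : Int) + 3) = ((a + 3 : Nat) : Int) from by push_cast; ring]
        rw [ih (a + 3) _ (by omega) (by omega) ?fresh]
        case fresh =>
          intro x hx
          rcases hmem x hx with hx' | hx'
          · have := hfresh x hx'
            have h33 : (a + 3) / 3 = a / 3 + 1 := by omega
            rw [h33]; push_cast; omega
          · have h33 : (a + 3) / 3 = a / 3 + 1 := by omega
            rw [hx', h33]; push_cast; omega
        rw [hlen]
        have hspec : pvSpec (pvQ gen sol) a (n - a)
            = (if (PySem.List.pyGetD gen ((a : Nat) : Int) 0 = PySem.List.pyGetD sol ((a : Nat) : Int) 0 ∨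
                   (PySem.List.pyGetD gen ((a : Int) + 1) 0 = PySem.List.pyGetD sol ((a : Int) + 1) 0 ∨
                    PySem.List.pyGetD gen ((a : Int) + 2) 0 = PySem.List.pyGetD sol ((a : Int) + 2) 0)) then 1 else 0)
              + pvSpec (pvQ gen sol) (a + 3) (n - (a + 3)) := by
          rw [pvSpec, if_neg (by omega),
              decide_eq_true (show 1 < n - a by omega), decide_eq_true (show 2 < n - a by omega),
              show n - a - 3 = n - (a + 3) from by omega]
          congr 1
          simp [pvQ, Bool.or_eq_true, decide_eq_true_eq, ← pvCast1, ← pvCast2, or_assoc]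
        rw [hspec]
        omega
      · -- partial last chunk: n = a + 1 or n = a + 2
        by_cases hc1 : n = a + 1
        · rw [PySem.List.pyRange_one_cons (by exact_mod_cast hlt),
              PySem.List.pyRange_one_eq_nil (by push_cast; omega)]
          simp only [List.foldl_cons, List.foldl_nil]
          simp only [hrw0]
          have hspec : pvSpec (pvQ gen sol) a (n - a)
              = (if PySem.List.pyGetD gen ((a : Nat) : Int) 0 = PySem.List.pyGetD sol ((a : Nat) : Int) 0 then 1 else 0) := by
            rw [pvSpec, if_neg (by omega),
                decide_eq_false (show ¬ (1 < n - a) by omega), decide_eq_false (show ¬ (2 < n - a) by omega),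
                show n - a - 3 = 0 from by omega, pvSpec_zero]
            simp [pvQ]
          rw [hspec]
          by_cases hp0 : PySem.List.pyGetD gen ((a : Nat) : Int) 0 = PySem.List.pyGetD sol ((a : Nat) : Int) 0
          · simp only [if_pos hp0]
            rw [PySem.Set.add_of_not_mem hg]
            simp
          · simp only [if_neg hp0]
            simp
        · have hc2 : n = a + 2 := by omega
          rw [PySem.List.pyRange_one_cons (by exact_mod_cast hlt),
              PySem.List.pyRange_one_cons (by push_cast; omega),
              PySem.List.pyRange_one_eq_nil (by push_cast; omega)]
          simp only [List.foldl_cons, List.foldl_nil]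
          simp only [hrw0, hrw1]
          have hspec : pvSpec (pvQ gen sol) a (n - a)
              = (if (PySem.List.pyGetD gen ((a : Nat) : Int) 0 = PySem.List.pyGetD sol ((a : Nat) : Int) 0 ∨
                     PySem.List.pyGetD gen ((a : Int) + 1) 0 = PySem.List.pyGetD sol ((a : Int) + 1) 0) then 1 else 0) := by
            rw [pvSpec, if_neg (by omega),
                decide_eq_true (show 1 < n - a by omega), decide_eq_false (show ¬ (2 < n - a) by omega),
                show n - a - 3 = 0 from by omega, pvSpec_zero]
            simp [pvQ, Bool.or_eq_true, decide_eq_true_eq, ← pvCast1]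
          rw [hspec]
          by_cases hp0 : PySem.List.pyGetD gen ((a : Nat) : Int) 0 = PySem.List.pyGetD sol ((a : Nat) : Int) 0 <;>
            by_cases hp1 : PySem.List.pyGetD gen ((a : Int) + 1) 0 = PySem.List.pyGetD sol ((a : Int) + 1) 0
          · simp only [if_pos hp0, if_pos hp1]
            rw [PySem.Set.add_of_not_mem hg,
                PySem.Set.add_of_mem (List.mem_append_right _ (List.mem_singleton_self _)), if_pos (Or.inl hp0)]
            simp
          · simp only [if_pos hp0, if_neg hp1]
            rw [PySem.Set.add_of_not_mem hg, if_pos (Or.inl hp0)]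
            simp
          · simp only [if_neg hp0, if_pos hp1]
            rw [PySem.Set.add_of_not_mem hg, if_pos (Or.inr hp1)]
            simp
          · simp only [if_neg hp0, if_neg hp1]
            rw [if_neg (by tauto)]
            simp

theorem pvChain3 (c0 c1 c2 : Prop) [Decidable c0] [Decidable c1] [Decidable c2] :
    (if c2 then true else if c1 then true else if c0 then true else false)
      = (decide c0 || decide c1 || decide c2) := by
  split_ifs <;> simp_all

theorem pvA_loop (gen sol : List Int) (m : Nat) : ∀ (a : Nat) (cont : Int),
    gen.length ≤ a + m →
    (PySem.List.pyRange (a : Int) (gen.length : Int) 3).foldl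
      (fun cont i =>
        let clausula_ok := (PySem.List.pyRange 0 3 1).foldl (fun ok j =>
          if i + j < (gen.length : Int) ∧
              PySem.List.pyGetD gen (i + j) 0 = PySem.List.pyGetD sol (i + j) 0 then true
          else ok) false
        if clausula_ok then cont + 1 else cont) cont
    = cont + (pvSpec (pvQ gen sol) a (gen.length - a) : Int) := by
  induction m with
  | zero =>
    intro a cont hle
    rw [pvRange3_nil _ _ (by exact_mod_cast by omega)]
    simp [show gen.length - a = 0 from by omega, pvSpec_zero]
  | succ m ih =>
    intro a cont hle
    by_cases hna : gen.length ≤ a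
    · rw [pvRange3_nil _ _ (by exact_mod_cast by omega)]
      simp [show gen.length - a = 0 from by omega, pvSpec_zero]
    · set n := gen.length with hn
      have hlt : a < n := by omega
      rw [pvRange3_cons _ _ (by exact_mod_cast hlt)]
      simp only [List.foldl_cons]
      rw [show ((a : Int) + 3) = ((a + 3 : Nat) : Int) from by push_cast; ring]
      rw [ih (a + 3) _ (by omega)]
      rw [show PySem.List.pyRange 0 3 1 = ([0, 1, 2] : List Int) from by decide]
      simp only [List.foldl_cons, List.foldl_nil]
      have hb1' : (((a : Int) + 1 < (n : Int)) ↔ 1 < n - a) := by omega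
      have hb2' : (((a : Int) + 2 < (n : Int)) ↔ 2 < n - a) := by omega
      have hb0' : ((a : Int) + 0 < (n : Int)) := by push_cast; omega
      have hspec : pvSpec (pvQ gen sol) a (n - a)
          = (if (pvQ gen sol a || (decide (1 < n - a) && pvQ gen sol (a + 1)) ||
                 (decide (2 < n - a) && pvQ gen sol (a + 2))) then 1 else 0)
            + pvSpec (pvQ gen sol) (a + 3) (n - (a + 3)) := by
        rw [pvSpec, if_neg (by omega), show n - a - 3 = n - (a + 3) from by omega]
      rw [hspec]
      have hguard : (if ((a : Int) + 2 < (n : Int) ∧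
              PySem.List.pyGetD gen ((a : Int) + 2) 0 = PySem.List.pyGetD sol ((a : Int) + 2) 0) then true
            else if ((a : Int) + 1 < (n : Int) ∧
              PySem.List.pyGetD gen ((a : Int) + 1) 0 = PySem.List.pyGetD sol ((a : Int) + 1) 0) then true
            else if ((a : Int) + 0 < (n : Int) ∧
              PySem.List.pyGetD gen ((a : Int) + 0) 0 = PySem.List.pyGetD sol ((a : Int) + 0) 0) then true
            else false)
          = (pvQ gen sol a || (decide (1 < n - a) && pvQ gen sol (a + 1)) ||
             (decide (2 < n - a) && pvQ gen sol (a + 2))) := by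
        rw [pvChain3]
        simp only [Bool.decide_and, add_zero]
        simp only [decide_eq_true (show (a : Int) < (n : Int) from by exact_mod_cast hlt),
            decide_eq_decide.mpr hb1', decide_eq_decide.mpr hb2']
        simp only [pvQ, ← pvCast1, ← pvCast2, Bool.true_and]
        ring_nf
      simp only [hguard]
      cases hgv : (pvQ gen sol a || (decide (1 < n - a) && pvQ gen sol (a + 1)) ||
             (decide (2 < n - a) && pvQ gen sol (a + 2))) <;>
        simp [hgv] <;> push_cast <;> ring


theorem pvPorts_agree (gen sol : List Int) :
    adaptacion_3sat gen sol = adaptacion_3sat_alt gen sol := by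
  unfold adaptacion_3sat adaptacion_3sat_alt
  have ha := pvA_loop gen sol gen.length 0 0 (by omega)
  have hb := pvB_loop gen sol gen.length 0 PySem.Set.empty (by omega) ⟨0, rfl⟩
    (by intro x hx; simp [PySem.Set.empty] at hx)
  rw [show ((0 : Nat) : Int) = (0 : Int) from by norm_num] at ha hb
  rw [ha, hb]
  simp [PySem.Set.empty]

-- ===== VERDICT (by name: the statement is the Claim_ definition above) =====
theorem adaptacion_3sat_spec : Claim_equal_adaptacion_3sat := by
  intro gen sol _ _
  unfold Spec_adaptacion_3sat
  exact pvPorts_agree gen sol
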